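-- pv_equiv track=rewrite | github.com/asweigart/programmedpatterns | book/visualpatterns.py | pattern88
-- ===== SOURCE A (Python) =====
-- def pattern88(size):
--     tess = [
--     r'___|',
--     r'_|__',
--     ]
--
--     pattern = ''
--     for y in range(size):
--         for line in tess:
--             pattern += (line * size) + '\n'
--     return pattern
-- ===== SOURCE B (Python) =====
-- def pattern88(size):
--     rows = [
--         ''.join('___|'[x % 4] for x in range(4 * size)),
--         ''.join('_|__'[x % 4] for x in range(4 * size)),
--     ]
--     return ''.join(rows[r % 2] + '\n' for r in range(2 * size))
-- ===== Notes on version B (the rewrite author's own statement) =====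
-- stated objective: alternative
-- what changed: B generates each of the two distinct rows character by character from column coordinates ('___|'[x % 4] over range(4*size)) and emits 2*size rows selected by row parity, instead of A's nested loop of string multiplication and concatenation.
import Mathlib
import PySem

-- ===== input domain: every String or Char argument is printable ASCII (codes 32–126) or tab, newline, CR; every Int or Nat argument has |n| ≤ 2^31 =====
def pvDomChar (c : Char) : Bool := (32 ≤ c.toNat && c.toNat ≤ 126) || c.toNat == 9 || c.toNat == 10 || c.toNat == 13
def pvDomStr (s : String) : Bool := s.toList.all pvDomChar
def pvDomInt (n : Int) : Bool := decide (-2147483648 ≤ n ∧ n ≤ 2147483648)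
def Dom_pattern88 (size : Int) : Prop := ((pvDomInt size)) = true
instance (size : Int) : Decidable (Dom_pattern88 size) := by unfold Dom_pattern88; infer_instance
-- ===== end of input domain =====

-- B builds the same tessellation character by character from grid coordinates (tess[r%2][x%4]) instead of A's string repetition; same output.

-- Python's 's * n' on strings (empty for n ≤ 0); exact hand port used by A.
def pyStrMul (s : String) (n : Int) : String := String.join (List.replicate n.toNat s)

-- ===== PORT A =====
def pattern88 (size : Int) : String :=
  (PySem.List.pyRange 0 size 1).foldl (fun pattern _y =>
    (["___|", "_|__"]).foldl (fun p line => p ++ (pyStrMul line size ++ "\n")) pattern) ""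

-- ===== PORT B =====
def pattern88_alt (size : Int) : String :=
  let row0 : List Char := (PySem.List.pyRange 0 (4 * size) 1).map
    (fun x => PySem.List.pyGetD "___|".toList (PySem.Int.mod x 4) ' ')
  let row1 : List Char := (PySem.List.pyRange 0 (4 * size) 1).map
    (fun x => PySem.List.pyGetD "_|__".toList (PySem.Int.mod x 4) ' ')
  String.ofList (((PySem.List.pyRange 0 (2 * size) 1).map
    (fun r => (if PySem.Int.mod r 2 == 0 then row0 else row1) ++ ['\n'])).flatten)

-- ===== PRECONDITION & SPEC =====
def Spec_pattern88 (size : Int) (out : String) : Prop := out = pattern88_alt size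
instance (size : Int) (out : String) : Decidable (Spec_pattern88 size out) := by unfold Spec_pattern88; infer_instance

-- ===== CLAIM (what is proved, stated in full; the proofs are below) =====
def Claim_equal_pattern88 : Prop := ∀ (size : Int), Dom_pattern88 size → Spec_pattern88 size (pattern88 size)

-- ===== LEMMAS AND PROOFS =====

theorem foldl_append_shift (l : List String) (a : String) :
    l.foldl (fun r s => r ++ s) a = a ++ l.foldl (fun r s => r ++ s) "" := by
  induction l generalizing a with
  | nil => simp
  | cons x xs ih =>
      simp only [List.foldl_cons]
      rw [ih (a ++ x), ih ("" ++ x)]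
      simp [String.append_assoc]

theorem foldl_const_append (l : List Int) (u : String) (acc : String) :
    l.foldl (fun p (_ : Int) => p ++ u) acc = acc ++ String.join (List.replicate l.length u) := by
  induction l generalizing acc with
  | nil => simp [String.join]
  | cons x xs ih =>
      simp only [List.foldl_cons, ih, List.length_cons, List.replicate_succ]
      simp only [String.join, List.foldl_cons]
      conv_rhs => rw [foldl_append_shift]
      simp [String.append_assoc]

-- A's value in closed form: n copies of the two-line unit.
theorem patternA_closed (size : Int) :
    pattern88 size = String.join (List.replicate size.toNat
      ((pyStrMul "___|" size ++ "\n") ++ (pyStrMul "_|__" size ++ "\n"))) := by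
  unfold pattern88
  simp only [List.foldl_cons, List.foldl_nil]
  have hfun : (fun (p : String) (_y : Int) => p ++ (pyStrMul "___|" size ++ "\n") ++ (pyStrMul "_|__" size ++ "\n"))
      = (fun (p : String) (_y : Int) => p ++ ((pyStrMul "___|" size ++ "\n") ++ (pyStrMul "_|__" size ++ "\n"))) := by
    funext p y; rw [String.append_assoc]
  rw [hfun, foldl_const_append]
  simp [PySem.List.length_pyRange_one]

theorem toList_join (l : List String) : (String.join l).toList = (l.map String.toList).flatten := by
  induction l with
  | nil => rfl
  | cons x xs ih =>
      have h : String.join (x :: xs) = x ++ String.join xs := by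
        simp only [String.join, List.foldl_cons]
        rw [foldl_append_shift]
        simp
      simp [h, ih]

theorem toList_pyStrMul (s : String) (n : Int) :
    (pyStrMul s n).toList = (List.replicate n.toNat s.toList).flatten := by
  simp only [pyStrMul, toList_join, List.map_replicate]

-- the inner column loop of B, in closed form (row has 4 chars)
theorem inner_map (row : List Char) (hrow : row.length = 4) (n : Nat) :
    (PySem.List.pyRange 0 (4 * (n : Int)) 1).map
      (fun x => PySem.List.pyGetD row (PySem.Int.mod x 4) ' ')
      = (List.replicate n row).flatten := by
  induction n with
  | zero => simp [PySem.List.pyRange_one_eq_nil]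
  | succ m ih =>
      have hsplit : PySem.List.pyRange 0 (4 * ((m + 1 : Nat) : Int)) 1
          = PySem.List.pyRange 0 (4 * (m : Int)) 1
            ++ [(4 * m : Int), (4 * m : Int) + 1, (4 * m : Int) + 2, (4 * m : Int) + 3] := by
        have he : (4 : Int) * ((m + 1 : Nat) : Int) = 4 * (m : Int) + 4 := by push_cast; ring
        rw [he,
            PySem.List.pyRange_one_append 0 (4 * (m : Int)) (4 * (m : Int) + 4) (by positivity) (by omega)]
        congr 1
        rw [PySem.List.pyRange_one_cons (by omega), PySem.List.pyRange_one_cons (by omega),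
            PySem.List.pyRange_one_cons (by omega), PySem.List.pyRange_one_cons (by omega),
            PySem.List.pyRange_one_eq_nil (by omega)]
        norm_num
        omega
      rw [hsplit, List.map_append, ih, List.replicate_succ', List.flatten_append]
      congr 1
      have h0 : PySem.Int.mod (4 * (m : Int)) 4 = 0 := by
        rw [PySem.Int.mod_eq_zero_iff_dvd]; exact ⟨m, by ring⟩
      have h1 : PySem.Int.mod (4 * (m : Int) + 1) 4 = 1 := by
        rw [PySem.Int.mod_eq_emod_of_pos (by omega)]; omega
      have h2 : PySem.Int.mod (4 * (m : Int) + 2) 4 = 2 := by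
        rw [PySem.Int.mod_eq_emod_of_pos (by omega)]; omega
      have h3 : PySem.Int.mod (4 * (m : Int) + 3) 4 = 3 := by
        rw [PySem.Int.mod_eq_emod_of_pos (by omega)]; omega
      simp only [List.map_cons, List.map_nil, h0, h1, h2, h3, List.flatten_cons, List.flatten_nil]
      match row, hrow with
      | [a, b, c, d], _ => rfl

-- the outer row loop of B, in closed form: n copies of the even-row block followed by the odd-row block
theorem rows_closed (g : Int → List Char)
    (hper : ∀ k : Nat, g (2 * (k : Int)) = g 0 ∧ g (2 * (k : Int) + 1) = g 1) (n : Nat) :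
    ((PySem.List.pyRange 0 (2 * (n : Int)) 1).map g).flatten
      = (List.replicate n (g 0 ++ g 1)).flatten := by
  induction n with
  | zero => simp [PySem.List.pyRange_one_eq_nil]
  | succ m ih =>
      have hsplit : PySem.List.pyRange 0 (2 * ((m + 1 : Nat) : Int)) 1
          = PySem.List.pyRange 0 (2 * (m : Int)) 1 ++ [(2 * m : Int), (2 * m : Int) + 1] := by
        have he : (2 : Int) * ((m + 1 : Nat) : Int) = 2 * (m : Int) + 2 := by push_cast; ring
        rw [he,
            PySem.List.pyRange_one_append 0 (2 * (m : Int)) (2 * (m : Int) + 2) (by positivity) (by omega)]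
        congr 1
        rw [PySem.List.pyRange_one_cons (by omega), PySem.List.pyRange_one_cons (by omega),
            PySem.List.pyRange_one_eq_nil (by omega)]
      rw [hsplit, List.map_append, List.flatten_append, ih, List.replicate_succ', List.flatten_append]
      congr 1
      simp [(hper m).1, (hper m).2]

-- ===== VERDICT (by name: the statement is the Claim_ definition above) =====
theorem pattern88_spec : Claim_equal_pattern88 := by
  intro size _
  show pattern88 size = pattern88_alt size
  by_cases hs : 0 ≤ size
  · lift size to Nat using hs with n
    rw [patternA_closed]
    unfold pattern88_alt
    apply String.ext
    simp only [String.toList_ofList]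
    rw [rows_closed _ (by
      intro k
      constructor <;> simp) n]
    rw [show (PySem.Int.mod 0 2 == 0) = true by decide,
        show (PySem.Int.mod 1 2 == 0) = false by decide]
    simp only [if_true, if_false, Bool.false_eq_true]
    rw [inner_map "___|".toList (by decide) n, inner_map "_|__".toList (by decide) n,
        toList_join, List.map_replicate]
    rw [show ((n:Int)).toNat = n from Int.toNat_natCast n]
    congr 1
    simp [toList_pyStrMul]
  · have hneg : size < 0 := by omega
    unfold pattern88 pattern88_alt
    have h1 : size ≤ (0:Int) := by omega
    have h2 : 2 * size ≤ (0:Int) := by omega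
    rw [PySem.List.pyRange_one_eq_nil h1, PySem.List.pyRange_one_eq_nil h2]
    simp
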